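-- pv_equiv track=rewrite | github.com/code-critic/codecritic | problems/TGH-18-19/SCHEDULE/schedule_no_numpy.py | canonic_coloring
-- ===== SOURCE A (Python) =====
-- def canonic_coloring(old_coloring):
--     """
--     Check that all vertices are colored and renumber colors.
--     Canonic coloring is such that we take sequence of colors sorted by vertex numbers.
--     take only first appearance of every color and resulting sequence has to be sorted.
--     :return:
--     """
--     coloring = []
--     old_to_new={}
--     for c in old_coloring:
--         new_col = old_to_new.get(c, len(old_to_new))
--         old_to_new[c] = new_col
--         coloring.append(new_col)
--     return coloring
-- ===== SOURCE B (Python) =====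
-- def canonic_coloring(old_coloring):
--     return [len(set(old_coloring[:old_coloring.index(c)])) for c in old_coloring]
-- ===== Notes on version B (the rewrite author's own statement) =====
-- stated objective: alternative
-- what changed: A maintains a dict and a running counter in one interleaved build-and-emit loop; B keeps no state at all and computes each new color directly as the number of distinct colors in the prefix before the color's first occurrence (a pure comprehension over index() and prefix sets), trading O(n) for O(n^2).
import Mathlib
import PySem

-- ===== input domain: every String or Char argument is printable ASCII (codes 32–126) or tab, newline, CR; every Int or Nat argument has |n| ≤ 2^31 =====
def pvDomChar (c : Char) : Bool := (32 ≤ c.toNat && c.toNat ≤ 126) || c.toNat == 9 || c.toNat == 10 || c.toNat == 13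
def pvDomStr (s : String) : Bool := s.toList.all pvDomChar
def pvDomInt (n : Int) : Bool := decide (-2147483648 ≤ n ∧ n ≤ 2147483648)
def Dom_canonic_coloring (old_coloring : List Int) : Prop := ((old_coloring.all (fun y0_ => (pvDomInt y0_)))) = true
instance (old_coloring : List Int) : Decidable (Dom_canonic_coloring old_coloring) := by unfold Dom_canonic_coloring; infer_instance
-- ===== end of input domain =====

-- B is a stateless alternative: each new color is computed directly as the number of distinct
-- colors strictly before that color's first occurrence, instead of A's interleaved dict+counter
-- loop (objective: alternative; B is O(n^2) where A is O(n)).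

-- ===== PORT A =====
-- the single loop: old_to_new.get(c, len(old_to_new)); old_to_new[c] = new_col; coloring.append(new_col)
def canonic_coloring (old_coloring : List Int) : List Int :=
  (old_coloring.foldl
    (fun (st : List Int × PySem.Dict Int Int) c =>
      let new_col : Int := st.2.getD c (st.2.size : Int)
      (st.1 ++ [new_col], st.2.insert c new_col))
    (([] : List Int), (PySem.Dict.empty : PySem.Dict Int Int))).1

-- ===== PORT B =====
-- [len(set(old_coloring[:old_coloring.index(c)])) for c in old_coloring].
-- old_coloring.index(c) is ported as (index? …).getD 0: c is drawn from old_coloring, so the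
-- Python call never raises ValueError and the default is never used.
def canonic_coloring_alt (old_coloring : List Int) : List Int :=
  old_coloring.map (fun c =>
    PySem.Set.len (PySem.Set.ofList
      (PySem.List.slice old_coloring none
        (some (((PySem.List.index? old_coloring c).getD 0 : Nat) : Int)))))

-- ===== PRECONDITION & SPEC =====
def Spec_canonic_coloring (old_coloring : List Int) (out : List Int) : Prop := out = canonic_coloring_alt old_coloring
instance (old_coloring : List Int) (out : List Int) : Decidable (Spec_canonic_coloring old_coloring out) := by unfold Spec_canonic_coloring; infer_instance

-- ===== CLAIM (what is proved, stated in full; the proofs are below) =====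
def Claim_equal_canonic_coloring : Prop := ∀ (old_coloring : List Int), Dom_canonic_coloring old_coloring → Spec_canonic_coloring old_coloring (canonic_coloring old_coloring)

-- ===== LEMMAS AND PROOFS =====

-- the dict mapping each element of u to its (n-offset) first-appearance index
def pvMkT (u : List Int) (n : Int) : PySem.Dict Int Int :=
  PySem.Dict.mk ((PySem.List.enumerate u n).map (fun p => (p.2, p.1)))

theorem pvMkT_get? (u : List Int) (c : Int) :
    ∀ n : Int, (pvMkT u n).get? c = if c ∈ u then some (n + (u.idxOf c : Int)) else none := by
  induction u with
  | nil => intro n; simp [pvMkT, PySem.List.enumerate]; rfl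
  | cons a u ih =>
    intro n
    by_cases hac : a = c
    · subst hac
      simp [pvMkT, PySem.List.enumerate_cons, PySem.Dict.get?_mk_cons]
    · have : (pvMkT (a :: u) n).get? c = (pvMkT u (n + 1)).get? c := by
        simp [pvMkT, PySem.List.enumerate_cons, PySem.Dict.get?_mk_cons, hac]
      rw [this, ih (n + 1)]
      by_cases hc : c ∈ u
      · have hne : c ≠ a := fun h => hac h.symm
        simp only [hc, if_true, List.mem_cons, hne, false_or, if_true]
        rw [List.idxOf_cons_ne _ (by exact fun h => hac h)]
        push_cast
        ring_nf
      · have hca : ¬ c = a := fun h => hac h.symm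
        simp [hc, hca]

theorem pvMkT_size (u : List Int) (n : Int) : (pvMkT u n).size = u.length := by
  simp [pvMkT, PySem.Dict.size, PySem.List.length_enumerate]

theorem pvMkT_contains (u : List Int) (n : Int) (c : Int) :
    (pvMkT u n).contains c = decide (c ∈ u) := by
  rw [PySem.Dict.contains_eq_isSome_get?, pvMkT_get?]
  by_cases hc : c ∈ u <;> simp [hc]

theorem pvMkT_insert_fresh (u : List Int) (n : Int) (c : Int) (h : c ∉ u) :
    (pvMkT u n).insert c (n + (u.length : Int)) = pvMkT (u ++ [c]) n := by
  apply PySem.Dict.ext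
  rw [PySem.Dict.items_insert_of_not_contains _ _ (by simp [pvMkT_contains, h])]
  simp [pvMkT, PySem.List.enumerate_append, PySem.List.enumerate_cons]

theorem pvMkT_insert_mem (u : List Int) (n : Int) (c : Int) (hn : u.Nodup) (h : c ∈ u) :
    (pvMkT u n).insert c (n + (u.idxOf c : Int)) = pvMkT u n := by
  apply PySem.Dict.ext
  rw [PySem.Dict.items_insert_of_contains _ _ (by simp [pvMkT_contains, h])]
  have hid : List.idxOf c u < u.length := List.idxOf_lt_length_of_mem h
  conv_rhs => rw [← List.map_id (pvMkT u n).items]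
  apply List.map_congr_left
  intro p hp
  rcases List.mem_map.mp hp with ⟨q, hq, rfl⟩
  rcases (PySem.List.mem_enumerate_iff u n q).mp hq with ⟨k, hk, rfl⟩
  by_cases hkey : u[k] = c
  · have : k = List.idxOf c u :=
      hn.getElem_inj_iff.mp (by rw [hkey, List.getElem_idxOf hid])
    simp [this]
  · simp [hkey]

-- A's loop invariant: from state (acc, table of u) it appends, for each c of xs,
-- the first-appearance index of c in the final unique list  u.update xs.
theorem pvFoldA (xs : List Int) : ∀ (u acc : List Int), u.Nodup →
    (xs.foldl
      (fun (st : List Int × PySem.Dict Int Int) c =>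
        let new_col : Int := st.2.getD c (st.2.size : Int)
        (st.1 ++ [new_col], st.2.insert c new_col))
      (acc, pvMkT u 0)).1
    = acc ++ xs.map (fun c => (((PySem.Set.update u xs).idxOf c : Nat) : Int)) := by
  induction xs with
  | nil => intro u acc _; simp [PySem.Set.update_nil]
  | cons c xs ih =>
    intro u acc hn
    rw [List.foldl_cons]
    have hsz := pvMkT_size u 0
    by_cases hc : c ∈ u
    · have hget : (pvMkT u 0).getD c ((pvMkT u 0).size : Int) = (u.idxOf c : Int) := by
        rw [PySem.Dict.getD_eq_get?_getD, pvMkT_get?]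
        simp [hc]
      have hupd : PySem.Set.update u (c :: xs) = PySem.Set.update u xs := by
        rw [PySem.Set.update_cons]
        congr 1
        simp [PySem.Set.add, PySem.Set.contains, hc]
      simp only [hget]
      have hins : (pvMkT u 0).insert c ((u.idxOf c : Nat) : Int) = pvMkT u 0 := by
        have := pvMkT_insert_mem u 0 c hn hc
        simpa using this
      rw [hins, ih u (acc ++ [((u.idxOf c : Nat) : Int)]) hn]
      have hhead : List.idxOf c (PySem.Set.update u xs) = List.idxOf c u := by
        rw [PySem.Set.update_eq_append_filter, List.idxOf_append_of_mem hc]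
      simp [hupd, hhead]
    · have hget : (pvMkT u 0).getD c ((pvMkT u 0).size : Int) = (u.length : Int) := by
        rw [PySem.Dict.getD_eq_get?_getD, pvMkT_get?]
        simp [hc, hsz]
      have hupd : PySem.Set.update u (c :: xs) = PySem.Set.update (u ++ [c]) xs := by
        rw [PySem.Set.update_cons]
        congr 1
        simp only [PySem.Set.add, PySem.Set.contains]
        rw [if_neg (by simpa using hc)]
      simp only [hget]
      have hins : (pvMkT u 0).insert c ((u.length : Nat) : Int) = pvMkT (u ++ [c]) 0 := by
        have := pvMkT_insert_fresh u 0 c hc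
        simpa using this
      have hn' : (u ++ [c]).Nodup := by
        refine List.Nodup.append hn (List.nodup_singleton c) ?_
        intro a ha hb
        simp only [List.mem_singleton] at hb
        exact hc (hb ▸ ha)
      rw [hins, ih (u ++ [c]) (acc ++ [((u.length : Nat) : Int)]) hn']
      have hmem : c ∈ u ++ [c] := by simp
      have hhead : List.idxOf c (PySem.Set.update (u ++ [c]) xs) = u.length := by
        rw [PySem.Set.update_eq_append_filter, List.idxOf_append_of_mem hmem,
            List.idxOf_append_of_notMem hc]
        simp
      simp [hupd, hhead]

theorem pvA_eq (xs : List Int) :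
    canonic_coloring xs = xs.map (fun c => (((PySem.Set.ofList xs).idxOf c : Nat) : Int)) := by
  have h0 : (PySem.Dict.empty : PySem.Dict Int Int) = pvMkT [] 0 := rfl
  unfold canonic_coloring
  rw [h0, pvFoldA xs [] [] List.nodup_nil]
  simp [PySem.Set.update_nil_left]

-- the prefix before c's first occurrence contains no c
theorem pvNotMemTake (xs : List Int) (c : Int) : c ∉ xs.take (xs.idxOf c) := by
  intro h
  have h1 : (xs.take (xs.idxOf c)).idxOf c < (xs.take (xs.idxOf c)).length :=
    List.idxOf_lt_length_of_mem h
  have h2 := List.idxOf_append_of_mem (l₂ := xs.drop (xs.idxOf c)) h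
  rw [List.take_append_drop] at h2
  have h3 : (xs.take (xs.idxOf c)).length ≤ xs.idxOf c := by
    simp [List.length_take]
  omega

-- B's core fact: #distinct colors before c's first occurrence = c's rank in set(xs)
theorem pvRank (xs : List Int) (c : Int) (hmem : c ∈ xs) :
    (PySem.Set.ofList (xs.take (xs.idxOf c))).length = (PySem.Set.ofList xs).idxOf c := by
  have hk : xs.idxOf c < xs.length := List.idxOf_lt_length_of_mem hmem
  have hdecomp : xs = xs.take (xs.idxOf c) ++ c :: xs.drop (xs.idxOf c + 1) := by
    conv_lhs => rw [← List.take_append_drop (xs.idxOf c) xs]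
    congr 1
    rw [List.drop_eq_getElem_cons hk, List.getElem_idxOf hk]
  set p := xs.take (xs.idxOf c) with hp
  have hcp : c ∉ p := pvNotMemTake xs c
  have hcop : c ∉ PySem.Set.ofList p := fun h => hcp ((PySem.Set.mem_ofList p c).mp h)
  conv_rhs => rw [hdecomp]
  rw [show PySem.Set.ofList (p ++ c :: xs.drop (xs.idxOf c + 1))
        = PySem.Set.update (PySem.Set.ofList p) (c :: xs.drop (xs.idxOf c + 1)) from
      PySem.Set.ofList_append p _,
    PySem.Set.update_cons, PySem.Set.add_of_not_mem hcop,
    PySem.Set.update_eq_append_filter, List.append_assoc,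
    List.idxOf_append_of_notMem hcop]
  simp

theorem pvB_eq (xs : List Int) :
    canonic_coloring_alt xs = xs.map (fun c => (((PySem.Set.ofList xs).idxOf c : Nat) : Int)) := by
  unfold canonic_coloring_alt
  apply List.map_congr_left
  intro c hc
  have hs : (PySem.List.index? xs c).isSome := by
    rw [PySem.List.index?_isSome_iff]; exact hc
  obtain ⟨k, hk⟩ := Option.isSome_iff_exists.mp hs
  rcases (PySem.List.index?_eq_some_iff (xs := xs) (v := c) (k := k)).mp hk with
    ⟨pre, suf, hxs, hlen, hnp⟩
  have hidx : xs.idxOf c = k := by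
    subst hxs
    rw [List.idxOf_append_of_notMem hnp]
    simp [hlen]
  rw [hk]
  simp only [Option.getD_some]
  rw [← hidx]
  simp only [PySem.List.slice_to_natCast]
  rw [show PySem.Set.len (PySem.Set.ofList (xs.take (xs.idxOf c)))
        = ((PySem.Set.ofList (xs.take (xs.idxOf c))).length : Int) from rfl,
    pvRank xs c hc]

-- ===== VERDICT (by name: the statement is the Claim_ definition above) =====
theorem canonic_coloring_spec : Claim_equal_canonic_coloring := by
  intro xs _
  unfold Spec_canonic_coloring
  rw [pvA_eq, pvB_eq]
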